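-- pv_equiv track=rewrite | github.com/thomasyp/project | temcoef/mcnp_lib.py | chooselib
-- ===== SOURCE A (Python) =====
-- def chooselib(tem):
--     mcnplib = {300:'30c',400:'40c',500:'50c',600:'60c',700:'70c',750:'75c'\
--           ,800:'80c',820:'82c',840:'84c',860:'86c',870:'87c',880:'88c',900:'90c'\
--           ,920:'92c',940:'94c',960:'96c',980:'98c',1000:'10c',1050:'05c'\
--           ,1100:'11c',1200:'12c',1300:'13c',1400:'14c',1500:'15c',1600:'16c'\
--           ,1700:'17c',1800:'18c',1900:'19c',2000:'20c',2100:'21c',2200:'22c'}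
--     mcnpths = {300:'30t',400:'40t',500:'50t',600:'60t',700:'70t',750:'75t'\
--           ,800:'80t',820:'82t',840:'84t',860:'86t',870:'87t',880:'88t',900:'90t'\
--           ,920:'92t',940:'94t',960:'96t',980:'98t',1000:'10t',1050:'05t'\
--           ,1100:'11t',1200:'12t',1300:'13t',1400:'14t',1500:'15t',1600:'16t'\
--           ,1700:'17t',1800:'18t',1900:'19t',2000:'20t',2100:'21t',2200:'22t'}
--     liblist = [300,400,500,600,700,750,800,820,840,860,870,880,900,920,940,960,980,1000,1050\
--            ,1100,1200,1300,1400,1500,1600,1700,1800,1900,2000,2100,2200]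
--     ii = 0
--     if tem > 2200 or tem < 300:
--         raise Exception("temperature is out of range")
--     else:
--         for ii in range(len(liblist)):
--             delttem = tem - liblist[ii]
--             if delttem > 0:
--                 ii = ii + 1
--             else:
--                 break
--         if abs(tem - liblist[ii])>abs(tem - liblist[ii-1]):
--             return (mcnplib[liblist[ii-1]], mcnpths[liblist[ii-1]])
--         else:
--             return (mcnplib[liblist[ii]], mcnpths[liblist[ii]])
-- ===== SOURCE B (Python) =====
-- def chooselib(tem):
--     if tem > 2200 or tem < 300:
--         raise Exception("temperature is out of range")
--     # one table of (temperature, two-char base code); suffix pair is base+'c', base+'t'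
--     table = [(300, '30'), (400, '40'), (500, '50'), (600, '60'), (700, '70'),
--              (750, '75'), (800, '80'), (820, '82'), (840, '84'), (860, '86'),
--              (870, '87'), (880, '88'), (900, '90'), (920, '92'), (940, '94'),
--              (960, '96'), (980, '98'), (1000, '10'), (1050, '05'), (1100, '11'),
--              (1200, '12'), (1300, '13'), (1400, '14'), (1500, '15'), (1600, '16'),
--              (1700, '17'), (1800, '18'), (1900, '19'), (2000, '20'), (2100, '21'),
--              (2200, '22')]
--     best = None  # (distance, base code); ascending scan with <= lets the higher
--     # temperature win exact-midpoint ties, as intended.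
--     for v, code in table:
--         d = abs(tem - v)
--         if best is None or d <= best[0]:
--             best = (d, code)
--     return (best[1] + 'c', best[1] + 't')
-- ===== Notes on version B (the rewrite author's own statement) =====
-- stated objective: simpler
-- what changed: Replaced A's two parallel suffix dicts plus break-early index scan with neighbor comparison (and its negative-index wrap) by one (temperature, base-code) table folded once with a running-best (distance, code) accumulator, the suffix pair built as base+'c'/base+'t'.
import Mathlib
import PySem

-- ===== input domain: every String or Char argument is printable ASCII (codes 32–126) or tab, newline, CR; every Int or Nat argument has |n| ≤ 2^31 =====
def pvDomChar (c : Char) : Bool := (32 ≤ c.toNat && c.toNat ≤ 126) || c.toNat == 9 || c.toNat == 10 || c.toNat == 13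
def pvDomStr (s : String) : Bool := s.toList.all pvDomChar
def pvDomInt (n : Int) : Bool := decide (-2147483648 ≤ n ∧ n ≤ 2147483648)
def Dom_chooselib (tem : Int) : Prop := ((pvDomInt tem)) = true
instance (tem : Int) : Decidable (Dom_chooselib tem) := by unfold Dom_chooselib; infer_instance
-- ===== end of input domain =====

-- B replaces A's two parallel suffix dicts and break-early index scan with neighbor
-- comparison by one (temperature, base-code) table folded once with a running-best
-- accumulator; objective: simpler. Pre_ excludes the inputs where A raises Exception.

-- ===== PORT A =====
def pvMcnplibA : PySem.Dict Int String :=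
  PySem.Dict.ofList [(300,"30c"),(400,"40c"),(500,"50c"),(600,"60c"),(700,"70c"),(750,"75c"),
   (800,"80c"),(820,"82c"),(840,"84c"),(860,"86c"),(870,"87c"),(880,"88c"),(900,"90c"),
   (920,"92c"),(940,"94c"),(960,"96c"),(980,"98c"),(1000,"10c"),(1050,"05c"),
   (1100,"11c"),(1200,"12c"),(1300,"13c"),(1400,"14c"),(1500,"15c"),(1600,"16c"),
   (1700,"17c"),(1800,"18c"),(1900,"19c"),(2000,"20c"),(2100,"21c"),(2200,"22c")]

def pvMcnpthsA : PySem.Dict Int String :=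
  PySem.Dict.ofList [(300,"30t"),(400,"40t"),(500,"50t"),(600,"60t"),(700,"70t"),(750,"75t"),
   (800,"80t"),(820,"82t"),(840,"84t"),(860,"86t"),(870,"87t"),(880,"88t"),(900,"90t"),
   (920,"92t"),(940,"94t"),(960,"96t"),(980,"98t"),(1000,"10t"),(1050,"05t"),
   (1100,"11t"),(1200,"12t"),(1300,"13t"),(1400,"14t"),(1500,"15t"),(1600,"16t"),
   (1700,"17t"),(1800,"18t"),(1900,"19t"),(2000,"20t"),(2100,"21t"),(2200,"22t")]

def pvLiblist : List Int :=
  [300,400,500,600,700,750,800,820,840,860,870,880,900,920,940,960,980,1000,1050,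
   1100,1200,1300,1400,1500,1600,1700,1800,1900,2000,2100,2200]

-- A's for-loop with break: iterate over the range indices; the body's 'ii = ii + 1'
-- is overwritten by the next iteration, so the break index is the first i with
-- tem - liblist[i] ≤ 0; without a break the final ii is last+1 (reached only
-- outside Pre_, where Python raises before the loop).
def chooselibLoopA (tem : Int) : List Int → Int → Int
  | [], ii => ii
  | i :: rest, _ =>
      let delttem := tem - ((PySem.List.pyGet? pvLiblist i).getD 0)
      if delttem > 0 then chooselibLoopA tem rest (i + 1) else i

def chooselib (tem : Int) : String × String :=
  if tem > 2200 ∨ tem < 300 then ("", "")  -- Python raises Exception here; excluded by Pre_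
  else
    let ii := chooselibLoopA tem (PySem.List.pyRange 0 (pvLiblist.length) 1) 0
    let libii := (PySem.List.pyGet? pvLiblist ii).getD 0
    let libiim1 := (PySem.List.pyGet? pvLiblist (ii - 1)).getD 0   -- Python's negative-index wrap at ii = 0
    if |tem - libii| > |tem - libiim1| then
      (pvMcnplibA.getD libiim1 "", pvMcnpthsA.getD libiim1 "")
    else
      (pvMcnplibA.getD libii "", pvMcnpthsA.getD libii "")

-- ===== PORT B =====
-- one table of (temperature, two-char base code); suffix pair is base+'c', base+'t'
def pvTableB : List (Int × String) :=
  [(300, "30"), (400, "40"), (500, "50"), (600, "60"), (700, "70"),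
   (750, "75"), (800, "80"), (820, "82"), (840, "84"), (860, "86"),
   (870, "87"), (880, "88"), (900, "90"), (920, "92"), (940, "94"),
   (960, "96"), (980, "98"), (1000, "10"), (1050, "05"), (1100, "11"),
   (1200, "12"), (1300, "13"), (1400, "14"), (1500, "15"), (1600, "16"),
   (1700, "17"), (1800, "18"), (1900, "19"), (2000, "20"), (2100, "21"),
   (2200, "22")]

-- Source B's for-loop: running best (distance, code), '<=' so the later (higher)
-- temperature wins exact-midpoint ties.  Python's 'base + "c"' string
-- concatenation is ported exactly as PySem.Str.join "" [base, "c"].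
def chooselib_alt (tem : Int) : String × String :=
  if tem > 2200 ∨ tem < 300 then ("", "")  -- Python raises Exception here; excluded by Pre_
  else
    let best := pvTableB.foldl
      (fun acc p =>
        let d := |tem - p.1|
        match acc with
        | none => some (d, p.2)
        | some (bd, bc) => if d ≤ bd then some (d, p.2) else some (bd, bc))
      (none : Option (Int × String))
    match best with
    | some (_, base) => (PySem.Str.join "" [base, "c"], PySem.Str.join "" [base, "t"])
    | none => ("", "")  -- unreachable: the table is non-empty

-- ===== PRECONDITION & SPEC =====
-- Pre_ excludes exactly the inputs on which A raises Exception("temperature is out of range").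
def Pre_chooselib (tem : Int) : Prop := 300 ≤ tem ∧ tem ≤ 2200
instance (tem : Int) : Decidable (Pre_chooselib tem) := by unfold Pre_chooselib; infer_instance
def pvWitness_chooselib : Int := 1000

def Spec_chooselib (tem : Int) (out : String × String) : Prop := out = chooselib_alt tem
instance (tem : Int) (out : String × String) : Decidable (Spec_chooselib tem out) := by unfold Spec_chooselib; infer_instance

-- ===== CLAIM (what is proved, stated in full; the proofs are below) =====
def Claim_equal_chooselib : Prop := ∀ (tem : Int), Dom_chooselib tem → Pre_chooselib tem → Spec_chooselib tem (chooselib tem)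

-- ===== LEMMAS AND PROOFS =====
-- all 1901 in-range temperatures, checked one by one by the kernel
set_option maxRecDepth 100000 in
set_option maxHeartbeats 4000000 in
theorem chooselib_all_cases :
    (List.range 1901).all (fun n => chooselib (300 + n) == chooselib_alt (300 + n)) = true := by
  decide

-- ===== VERDICT (by name: the statement is the Claim_ definition above) =====
theorem chooselib_spec : Claim_equal_chooselib := by
  intro tem _ hpre
  obtain ⟨h1, h2⟩ := hpre
  unfold Spec_chooselib
  have hn : ∃ n : ℕ, n < 1901 ∧ tem = 300 + (n : Int) := by
    refine ⟨(tem - 300).toNat, ?_, ?_⟩ <;> omega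
  obtain ⟨n, hn, rfl⟩ := hn
  have := List.all_eq_true.mp chooselib_all_cases n (List.mem_range.mpr hn)
  exact eq_of_beq this
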